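-- pv_equiv track=rewrite | github.com/leovanbon/TRR_Project | common/utils.py | radix_comp
-- ===== SOURCE A (Python) =====
-- def radix_comp(v1, v2):
--     if len(v1) != len(v2):
--         raise ValueError("Binary numbers must have the same length")
--
--     for bit1, bit2 in zip(v1, v2):
--         if bit1 > bit2:
--             return 1  # num1 is larger
--         elif bit1 < bit2:
--             return -1  # num2 is larger
--
--     return 0  # Numbers are equal
-- ===== SOURCE B (Python) =====
-- def radix_comp(v1, v2):
--     if len(v1) != len(v2):
--         raise ValueError("Binary numbers must have the same length")
--     return (v1 > v2) - (v1 < v2)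
-- ===== Notes on version B (the rewrite author's own statement) =====
-- stated objective: idiomatic
-- what changed: Replaces the explicit bit-by-bit loop with two early returns by Python's built-in lexicographic sequence comparison in the closed form (v1 > v2) - (v1 < v2).
import Mathlib
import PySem

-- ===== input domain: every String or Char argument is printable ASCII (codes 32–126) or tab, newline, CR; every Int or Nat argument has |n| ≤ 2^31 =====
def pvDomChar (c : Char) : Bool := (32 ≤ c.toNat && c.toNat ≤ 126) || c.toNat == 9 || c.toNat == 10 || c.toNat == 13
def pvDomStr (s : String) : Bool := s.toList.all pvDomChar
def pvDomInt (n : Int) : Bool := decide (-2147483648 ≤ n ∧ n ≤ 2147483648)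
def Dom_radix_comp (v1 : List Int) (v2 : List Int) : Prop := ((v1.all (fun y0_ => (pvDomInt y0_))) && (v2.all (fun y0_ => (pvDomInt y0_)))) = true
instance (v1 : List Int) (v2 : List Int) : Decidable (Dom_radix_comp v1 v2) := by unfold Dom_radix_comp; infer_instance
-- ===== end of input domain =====

-- B replaces A's explicit first-difference loop with the closed form (v1 > v2) - (v1 < v2)
-- over Python's built-in lexicographic list comparison (idiomatic; same cost).

-- ===== PORT A =====
-- A's for-loop over zip(v1, v2) with its two early returns, as structural recursion.
def radixCompLoop : List Int → List Int → Int
  | b1 :: r1, b2 :: r2 =>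
      if b1 > b2 then 1 else if b1 < b2 then -1 else radixCompLoop r1 r2
  | _, _ => 0

def radix_comp (v1 : List Int) (v2 : List Int) : Int := radixCompLoop v1 v2

-- ===== PORT B =====
-- Python's built-in lexicographic '<' on lists of ints.
def pyListLt : List Int → List Int → Bool
  | [], [] => false
  | [], _ :: _ => true
  | _ :: _, [] => false
  | a :: as_, b :: bs =>
      if a < b then true else if b < a then false else pyListLt as_ bs

-- (v1 > v2) - (v1 < v2): bools coerced to ints and subtracted.
def radix_comp_alt (v1 : List Int) (v2 : List Int) : Int :=
  (if pyListLt v2 v1 then (1 : Int) else 0) - (if pyListLt v1 v2 then (1 : Int) else 0)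

-- ===== PRECONDITION & SPEC =====
-- A raises ValueError when the lengths differ; exactly those inputs are excluded.
def Pre_radix_comp (v1 : List Int) (v2 : List Int) : Prop := v1.length = v2.length
instance (v1 : List Int) (v2 : List Int) : Decidable (Pre_radix_comp v1 v2) := by
  unfold Pre_radix_comp; infer_instance

def pvWitness_radix_comp : List Int × List Int := ([0, 1, 1], [0, 1, 0])

def Spec_radix_comp (v1 : List Int) (v2 : List Int) (out : Int) : Prop := out = radix_comp_alt v1 v2
instance (v1 : List Int) (v2 : List Int) (out : Int) : Decidable (Spec_radix_comp v1 v2 out) := by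
  unfold Spec_radix_comp; infer_instance

-- ===== CLAIM (what is proved, stated in full; the proofs are below) =====
def Claim_equal_radix_comp : Prop := ∀ (v1 : List Int) (v2 : List Int), Dom_radix_comp v1 v2 → Pre_radix_comp v1 v2 → Spec_radix_comp v1 v2 (radix_comp v1 v2)

-- ===== LEMMAS AND PROOFS =====
theorem radixCompLoop_eq (v1 v2 : List Int) (h : v1.length = v2.length) :
    radixCompLoop v1 v2 =
      (if pyListLt v2 v1 then (1 : Int) else 0) - (if pyListLt v1 v2 then (1 : Int) else 0) := by
  induction v1 generalizing v2 with
  | nil =>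
    cases v2 with
    | nil => simp [radixCompLoop, pyListLt]
    | cons b bs => simp at h
  | cons a as ih =>
    cases v2 with
    | nil => simp at h
    | cons b bs =>
      simp only [List.length_cons, Nat.add_right_cancel_iff] at h
      by_cases hab : a < b
      · simp [radixCompLoop, pyListLt, hab, not_lt.mpr (le_of_lt hab)]
      · by_cases hba : b < a
        · simp [radixCompLoop, pyListLt, hab, hba]
        · simp [radixCompLoop, pyListLt, hab, hba, ih bs h]

-- ===== VERDICT (by name: the statement is the Claim_ definition above) =====
theorem radix_comp_spec : Claim_equal_radix_comp := by
  intro v1 v2 _ hpre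
  unfold Spec_radix_comp radix_comp radix_comp_alt
  exact radixCompLoop_eq v1 v2 hpre
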